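-- pv_equiv track=rewrite | github.com/vis-world/Jinling-Dataset-Visualization | test.py | deduplicate_nodes
-- ===== SOURCE A (Python) =====
-- def deduplicate_nodes(nodes):
--     unique_nodes = {}
--     deduplicated_nodes = []
--
--     nodes.sort(key=lambda x: x['id'])
--
--     for node in nodes:
--         node_id = node['id']
--         if node_id not in unique_nodes:
--             unique_nodes[node_id] = True
--             deduplicated_nodes.append(node)
--
--     return deduplicated_nodes
-- ===== SOURCE B (Python) =====
-- def deduplicate_nodes(nodes):
--     nodes.sort(key=lambda x: x['id'])
--     deduplicated = []
--     rest = nodes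
--     while rest:
--         head = rest[0]
--         deduplicated.append(head)
--         hid = head['id']
--         rest = [n for n in rest[1:] if n['id'] != hid]
--     return deduplicated
-- ===== Notes on version B (the rewrite author's own statement) =====
-- stated objective: alternative
-- what changed: B keeps A's in-place sort but replaces the seen-dict single pass by a selection-style nub: repeatedly take the first remaining node and filter every node with its id out of the rest, so no auxiliary membership structure or last-seen state is maintained (it trades extra filtering passes for that); return-value equivalence, both sort the argument in place.
import Mathlib
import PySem

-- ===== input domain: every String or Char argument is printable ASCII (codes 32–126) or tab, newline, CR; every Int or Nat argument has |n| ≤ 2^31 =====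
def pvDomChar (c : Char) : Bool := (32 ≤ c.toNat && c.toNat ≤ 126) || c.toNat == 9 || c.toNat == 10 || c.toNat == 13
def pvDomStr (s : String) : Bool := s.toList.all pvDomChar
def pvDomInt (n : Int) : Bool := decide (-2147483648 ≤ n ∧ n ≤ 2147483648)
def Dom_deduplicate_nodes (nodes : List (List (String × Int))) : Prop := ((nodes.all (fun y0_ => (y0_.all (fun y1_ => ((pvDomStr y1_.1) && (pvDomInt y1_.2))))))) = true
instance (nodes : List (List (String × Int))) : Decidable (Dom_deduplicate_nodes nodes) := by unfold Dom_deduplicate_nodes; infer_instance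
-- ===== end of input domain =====

-- B keeps A's in-place sort but dedups by a selection-style nub (take the head, filter its id
-- out of the rest, repeat) instead of A's seen-dict pass; return-value equivalence only:
-- both Pythons sort `nodes` in place identically.

-- node['id'] (default 0 is unreachable inside Pre_, which requires the key to be present)
def pvKeyId (d : List (String × Int)) : Int := (PySem.Dict.mk d).getD "id" 0

-- ===== PORT A =====
def pvStepA (st : PySem.Dict Int Bool × List (List (String × Int))) (node : List (String × Int)) :
    PySem.Dict Int Bool × List (List (String × Int)) :=
  let nid := pvKeyId node
  if (st.1.get? nid).isSome then st
  else (st.1.insert nid true, st.2 ++ [node])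

def deduplicate_nodes (nodes : List (List (String × Int))) : List (List (String × Int)) :=
  ((PySem.List.sorted nodes pvKeyId false).foldl pvStepA
    ((PySem.Dict.empty : PySem.Dict Int Bool), ([] : List (List (String × Int))))).2

-- ===== PORT B =====
-- the while-loop of Source B: state (deduplicated, rest); terminates because rest shrinks
def pvNubLoop (acc rest : List (List (String × Int))) : List (List (String × Int)) :=
  match rest with
  | [] => acc
  | head :: t => pvNubLoop (acc ++ [head]) (t.filter (fun n => pvKeyId n ≠ pvKeyId head))
termination_by rest.length
decreasing_by
  simp only [List.length_unattach, List.length_cons]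
  exact Nat.lt_succ_of_le (le_trans (List.length_filter_le _ _) (by simp))

def deduplicate_nodes_alt (nodes : List (List (String × Int))) : List (List (String × Int)) :=
  pvNubLoop [] (PySem.List.sorted nodes pvKeyId false)

-- ===== PRECONDITION & SPEC =====
-- Pre_ excludes exactly the nodes without an 'id' key, on which Python A raises KeyError.
def Pre_deduplicate_nodes (nodes : List (List (String × Int))) : Prop :=
  ∀ node ∈ nodes, ((PySem.Dict.mk node).get? "id").isSome = true
instance (nodes : List (List (String × Int))) : Decidable (Pre_deduplicate_nodes nodes) := by
  unfold Pre_deduplicate_nodes; infer_instance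

def pvWitness_deduplicate_nodes : (List (List (String × Int))) :=
  [[("id", 2), ("x", 5)], [("id", 1)], [("id", 2), ("x", 7)]]

def Spec_deduplicate_nodes (nodes : List (List (String × Int))) (out : List (List (String × Int))) : Prop := out = deduplicate_nodes_alt nodes
instance (nodes : List (List (String × Int))) (out : List (List (String × Int))) : Decidable (Spec_deduplicate_nodes nodes out) := by unfold Spec_deduplicate_nodes; infer_instance

-- ===== CLAIM (what is proved, stated in full; the proofs are below) =====
def Claim_equal_deduplicate_nodes : Prop := ∀ (nodes : List (List (String × Int))), Dom_deduplicate_nodes nodes → Pre_deduplicate_nodes nodes → Spec_deduplicate_nodes nodes (deduplicate_nodes nodes)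

-- ===== LEMMAS AND PROOFS =====

-- equation lemmas for the well-founded pvNubLoop
lemma pvNubLoop_nil (acc : List (List (String × Int))) : pvNubLoop acc [] = acc := by
  rw [pvNubLoop]

lemma pvNubLoop_cons (acc h : _) (t : List (List (String × Int))) :
    pvNubLoop acc (h :: t) = pvNubLoop (acc ++ [h]) (t.filter (fun n => pvKeyId n ≠ pvKeyId h)) := by
  rw [pvNubLoop]

-- A's seen-dict fold over ANY list equals B's nub loop run on the list with the
-- already-seen ids filtered out (no sortedness needed).
lemma pv_fold_eq_nub (l : List (List (String × Int))) :
    ∀ (seen : PySem.Dict Int Bool) (acc : List (List (String × Int))),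
    (l.foldl pvStepA (seen, acc)).2 =
      pvNubLoop acc (l.filter (fun n => (seen.get? (pvKeyId n)).isNone)) := by
  induction l with
  | nil => intro seen acc; simp [pvNubLoop_nil]
  | cons x xs ih =>
    intro seen acc
    simp only [List.foldl_cons, List.filter_cons]
    by_cases hx : (seen.get? (pvKeyId x)).isSome
    · rw [show pvStepA (seen, acc) x = (seen, acc) by simp [pvStepA, hx]]
      have h1 : (seen.get? (pvKeyId x)).isNone = false := by
        simp [Option.isNone_eq_false_iff]; exact hx
      rw [h1]
      simpa using ih seen acc
    · have hnone : seen.get? (pvKeyId x) = none := Option.not_isSome_iff_eq_none.mp hx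
      rw [show pvStepA (seen, acc) x = (seen.insert (pvKeyId x) true, acc ++ [x]) by
        simp [pvStepA, hnone]]
      rw [show ((seen.get? (pvKeyId x)).isNone : Bool) = true by simp [hnone]]
      simp only [if_true]
      rw [pvNubLoop_cons, ih (seen.insert (pvKeyId x) true) (acc ++ [x]), List.filter_filter]
      congr 1
      apply List.filter_congr
      intro n _
      rw [PySem.Dict.get?_insert]
      by_cases hne : pvKeyId n = pvKeyId x <;> simp [hne]

-- ===== VERDICT (by name: the statement is the Claim_ definition above) =====
theorem deduplicate_nodes_spec : Claim_equal_deduplicate_nodes := by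
  intro nodes _ _
  unfold Spec_deduplicate_nodes deduplicate_nodes deduplicate_nodes_alt
  rw [pv_fold_eq_nub]
  congr 1
  simp [PySem.Dict.get?_empty]
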